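-- pv_equiv track=rewrite | github.com/oEliteo/static-site-generator | src/htmlnode.py | get_heading_hashtag_count
-- ===== SOURCE A (Python) =====
-- def get_heading_hashtag_count(block):
--     if block.startswith("#"):
--         hash_count = 0
--         for c in block:
--             if c == "#":
--                 hash_count += 1
--             elif c == " ":
--                 break
--             if hash_count > 6:
--                 break
--
--         if (
--             1 <= hash_count <= 6
--             and len(block) > hash_count
--             and block[hash_count] == " "
--         ):
--             return hash_count
-- ===== SOURCE B (Python) =====
-- def get_heading_hashtag_count(block):
--     count = len(block) - len(block.lstrip("#"))
--     if 1 <= count <= 6 and block[count:count+1] == " ":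
--         return count
-- ===== Notes on version B (the rewrite author's own statement) =====
-- stated objective: simpler
-- what changed: Replaces A's character-by-character counting loop with its two break conditions by a closed-form lstrip-length computation (leading '#'-run length) plus a one-character slice test.
import Mathlib
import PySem

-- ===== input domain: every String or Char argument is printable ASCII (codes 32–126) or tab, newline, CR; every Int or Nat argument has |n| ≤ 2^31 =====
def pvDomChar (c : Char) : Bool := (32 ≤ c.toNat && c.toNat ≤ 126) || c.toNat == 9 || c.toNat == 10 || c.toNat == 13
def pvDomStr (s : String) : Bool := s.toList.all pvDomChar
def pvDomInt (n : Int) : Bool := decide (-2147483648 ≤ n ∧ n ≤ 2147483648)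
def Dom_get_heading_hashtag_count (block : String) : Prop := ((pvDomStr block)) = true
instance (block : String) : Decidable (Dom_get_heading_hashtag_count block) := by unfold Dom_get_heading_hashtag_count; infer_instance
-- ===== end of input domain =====

-- B replaces A's char-by-char counting loop (with its two break conditions) by a closed-form
-- lstrip-length computation plus a one-character slice test; objective: simpler.

-- ===== PORT A =====
-- A's for-loop over the characters with its two `break`s, as structural recursion on the
-- character list carrying `hash_count`.
def pvLoopA : List Char → Nat → Nat
  | [], n => n
  | c :: cs, n =>
    if c = '#' then
      let n' := n + 1
      if n' > 6 then n' else pvLoopA cs n'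
    else if c = ' ' then n
    else if n > 6 then n else pvLoopA cs n

def get_heading_hashtag_count (block : String) : Option Int :=
  if PySem.Str.startswith block "#" then
    let m := pvLoopA block.toList 0
    if 1 ≤ m ∧ m ≤ 6 ∧ PySem.Str.len block > m ∧ PySem.Str.pyGet? block (m : Int) = some ' '
    then some (m : Int) else none
  else none

-- ===== PORT B =====
def get_heading_hashtag_count_alt (block : String) : Option Int :=
  -- block.lstrip("#") ported by hand: dropping the leading run of '#' is exact for a
  -- single-character strip set.
  let count : Nat := block.toList.length - (block.toList.dropWhile (· == '#')).length
  if 1 ≤ count ∧ count ≤ 6 ∧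
      PySem.Str.slice block (some (count : Int)) (some ((count : Int) + 1)) = " "
  then some (count : Int) else none

-- ===== PRECONDITION & SPEC =====
def Spec_get_heading_hashtag_count (block : String) (out : Option Int) : Prop := out = get_heading_hashtag_count_alt block
instance (block : String) (out : Option Int) : Decidable (Spec_get_heading_hashtag_count block out) := by unfold Spec_get_heading_hashtag_count; infer_instance

-- ===== CLAIM (what is proved, stated in full; the proofs are below) =====
def Claim_equal_get_heading_hashtag_count : Prop := ∀ (block : String), Dom_get_heading_hashtag_count block → Spec_get_heading_hashtag_count block (get_heading_hashtag_count block)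

-- ===== LEMMAS AND PROOFS =====

-- A's loop computes: 0 + (number of '#' before the first space), capped by the >6 break at 7.
theorem pvLoopA_spec (cs : List Char) : ∀ n : Nat, n ≤ 6 →
    pvLoopA cs n =
      (if n + ((cs.takeWhile (· != ' ')).count '#') ≤ 6
       then n + ((cs.takeWhile (· != ' ')).count '#') else 7) := by
  induction cs with
  | nil => intro n hn; simp [pvLoopA]; omega
  | cons c cs ih =>
    intro n hn
    by_cases hc : c = '#'
    · subst hc
      have hrw : ((('#' : Char) :: cs).takeWhile (· != ' ')).count '#'
          = (cs.takeWhile (· != ' ')).count '#' + 1 := by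
        simp
      rw [hrw]
      by_cases h7 : n + 1 > 6
      · have h1 : pvLoopA ('#' :: cs) n = n + 1 := by simp [pvLoopA, h7]
        rw [h1]; split_ifs <;> omega
      · have h1 : pvLoopA ('#' :: cs) n = pvLoopA cs (n + 1) := by simp [pvLoopA, h7]
        rw [h1, ih (n + 1) (by omega)]
        split_ifs <;> omega
    · by_cases hs : c = ' '
      · subst hs
        have h1 : pvLoopA (' ' :: cs) n = n := by simp [pvLoopA]
        have hrw : (((' ' : Char) :: cs).takeWhile (· != ' ')).count '#' = 0 := by
          simp
        rw [h1, hrw]; split_ifs <;> omega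
      · have h1 : pvLoopA (c :: cs) n = pvLoopA cs n := by
          simp [pvLoopA, hc, hs, show ¬ n > 6 by omega]
        have hrw : ((c :: cs).takeWhile (· != ' ')).count '#'
            = (cs.takeWhile (· != ' ')).count '#' := by
          simp [List.takeWhile_cons, hs, hc]
        rw [h1, hrw, ih n hn]

theorem pv_take_one_eq_space (l : List Char) : l.take 1 = [' '] ↔ l[0]? = some ' ' := by
  cases l <;> simp

-- if the char right after the leading '#'-run is a space, the hash-count before the first
-- space equals the run length
theorem pv_k_space (cs : List Char)
    (h : cs[(cs.takeWhile (· == '#')).length]? = some ' ') :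
    (cs.takeWhile (· != ' ')).count '#' = (cs.takeWhile (· == '#')).length := by
  set Q := cs.takeWhile (· == '#') with hQ
  have hsplit : cs = Q ++ cs.dropWhile (· == '#') := (List.takeWhile_append_dropWhile).symm
  have hall : ∀ x ∈ Q, x = '#' := by
    intro x hx
    have := List.mem_takeWhile_imp hx
    simpa using this
  have hD : (cs.dropWhile (· == '#'))[0]? = some ' ' := by
    have := h
    rw [hsplit] at this
    simpa [List.getElem?_append_right] using this
  obtain ⟨D', hD'⟩ : ∃ D', cs.dropWhile (· == '#') = ' ' :: D' := by
    cases hE : cs.dropWhile (· == '#') with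
    | nil => rw [hE] at hD; simp at hD
    | cons a t => rw [hE] at hD; simp at hD; exact ⟨t, by rw [hD]⟩
  have htw : cs.takeWhile (· != ' ') = Q := by
    rw [hsplit, hD', List.takeWhile_append]
    have h1 : Q.takeWhile (· != ' ') = Q := by
      rw [List.takeWhile_eq_self_iff]
      intro a ha; simp [hall a ha]
    simp [h1]
  rw [htw, List.count_eq_length.mpr (by intro b hb; simpa using (hall b hb).symm)]

-- conversely: if the char at index (hash-count before first space) is a space, that count
-- equals the leading '#'-run length
theorem pv_h_space (cs : List Char)
    (h : cs[(cs.takeWhile (· != ' ')).count '#']? = some ' ') :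
    (cs.takeWhile (· != ' ')).count '#' = (cs.takeWhile (· == '#')).length := by
  have hle : (cs.takeWhile (· != ' ')).count '#' ≤ (cs.takeWhile (· != ' ')).length :=
    List.count_le_length
  have hsplit : cs.takeWhile (· != ' ') ++ cs.dropWhile (· != ' ') = cs :=
    List.takeWhile_append_dropWhile
  have heq : (cs.takeWhile (· != ' ')).count '#' = (cs.takeWhile (· != ' ')).length := by
    by_contra hne
    have hlt : (cs.takeWhile (· != ' ')).count '#' < (cs.takeWhile (· != ' ')).length :=
      lt_of_le_of_ne hle hne
    have hg := List.getElem?_append_left (l₂ := cs.dropWhile (· != ' ')) hlt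
    rw [hsplit] at hg
    rw [hg, List.getElem?_eq_getElem hlt] at h
    have hmem : (cs.takeWhile (· != ' '))[(cs.takeWhile (· != ' ')).count '#'] ∈
        cs.takeWhile (· != ' ') := List.getElem_mem hlt
    have hp := List.mem_takeWhile_imp hmem
    have hsp : (cs.takeWhile (· != ' '))[(cs.takeWhile (· != ' ')).count '#'] = ' ' := by
      simpa using h
    simp [hsp] at hp
  have hallP : ∀ x ∈ cs.takeWhile (· != ' '), x = '#' := by
    intro x hx
    exact (List.count_eq_length.mp heq x hx).symm
  have hD0 : (cs.dropWhile (· != ' '))[0]? = some ' ' := by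
    have hg := List.getElem?_append_right
      (l₁ := cs.takeWhile (· != ' ')) (l₂ := cs.dropWhile (· != ' '))
      (i := (cs.takeWhile (· != ' ')).length) le_rfl
    rw [hsplit] at hg
    simp only [Nat.sub_self] at hg
    have h' := h
    rw [heq, hg] at h'
    exact h'
  obtain ⟨D', hD'⟩ : ∃ D', cs.dropWhile (· != ' ') = ' ' :: D' := by
    cases hE : cs.dropWhile (· != ' ') with
    | nil => rw [hE] at hD0; simp at hD0
    | cons a t => rw [hE] at hD0; simp at hD0; exact ⟨t, by rw [hD0]⟩
  have htw : cs.takeWhile (· == '#') = cs.takeWhile (· != ' ') := by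
    conv_lhs => rw [← hsplit]
    rw [hD', List.takeWhile_append]
    have h1 : (cs.takeWhile (· != ' ')).takeWhile (· == '#') = cs.takeWhile (· != ' ') := by
      rw [List.takeWhile_eq_self_iff]
      intro a ha; simp [hallP a ha]
    simp [h1]
  rw [heq, htw]

-- the list-level equivalence
theorem pv_core (cs : List Char) :
    (if ['#'] <+: cs then
       (if 1 ≤ pvLoopA cs 0 ∧ pvLoopA cs 0 ≤ 6 ∧ cs.length > pvLoopA cs 0 ∧
            cs[pvLoopA cs 0]? = some ' '
        then some ((pvLoopA cs 0 : Nat) : Int) else none)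
     else none)
    = (if 1 ≤ cs.length - (cs.dropWhile (· == '#')).length ∧
          cs.length - (cs.dropWhile (· == '#')).length ≤ 6 ∧
          (cs.drop (cs.length - (cs.dropWhile (· == '#')).length)).take 1 = [' ']
       then some ((cs.length - (cs.dropWhile (· == '#')).length : Nat) : Int) else none) := by
  have hk : cs.length - (cs.dropWhile (· == '#')).length = (cs.takeWhile (· == '#')).length := by
    have hsp : (cs.takeWhile (· == '#')).length + (cs.dropWhile (· == '#')).length
        = cs.length := by
      rw [← List.length_append, List.takeWhile_append_dropWhile]
    omega
  rw [hk]
  cases cs with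
  | nil => simp
  | cons c t =>
    by_cases hc : c = '#'
    case neg =>
      have hpre : ¬ (['#'] <+: c :: t) := by
        intro hp
        rcases hp with ⟨s, hs⟩
        simp at hs
        exact hc hs.1.symm
      have hk0 : ((c :: t).takeWhile (· == '#')).length = 0 := by
        simp [List.takeWhile_cons, hc]
      rw [if_neg hpre, hk0]
      simp
    case pos =>
      subst hc
      have hpre : ['#'] <+: '#' :: t := ⟨t, rfl⟩
      have hhk := pv_h_space ('#' :: t)
      have hkh := pv_k_space ('#' :: t)
      have hm := pvLoopA_spec ('#' :: t) 0 (by omega)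
      have hk1 : 1 ≤ (('#' :: t).takeWhile (· == '#')).length := by
        simp
      have hdt : ∀ j : Nat, (('#' :: t).drop j).take 1 = [' '] ↔ ('#' :: t)[j]? = some ' ' := by
        intro j
        rw [pv_take_one_eq_space]
        simp [List.getElem?_drop]
      rw [if_pos hpre, hm]
      simp only [Nat.zero_add] at *
      generalize hH : (List.takeWhile (fun x => x != ' ') ('#' :: t)).count '#' = H at *
      generalize hK : (List.takeWhile (fun x => x == '#') ('#' :: t)).length = K at *
      by_cases h6 : H ≤ 6
      · rw [if_pos h6]
        by_cases hsp : ('#' :: t)[H]? = some ' '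
        · have heq := hhk hsp
          subst heq
          have hlen : ('#' :: t).length > H :=
            (List.getElem?_eq_some_iff.mp hsp).1
          rw [if_pos ⟨by omega, h6, hlen, hsp⟩,
              if_pos ⟨hk1, h6, (hdt H).mpr hsp⟩]
        · rw [if_neg (by rintro ⟨-, -, -, hx⟩; exact hsp hx),
              if_neg (by
                rintro ⟨-, -, hx⟩
                have hx' := (hdt K).mp hx
                have hek := hkh hx'
                subst hek
                exact hsp hx')]
      · rw [if_neg h6]
        rw [if_neg (by rintro ⟨-, h2, -, -⟩; omega),
            if_neg (by
              rintro ⟨-, hk6, hx⟩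
              have hek := hkh ((hdt K).mp hx)
              omega)]

-- ===== VERDICT (by name: the statement is the Claim_ definition above) =====
theorem get_heading_hashtag_count_spec : Claim_equal_get_heading_hashtag_count := by
  intro block _
  unfold Spec_get_heading_hashtag_count get_heading_hashtag_count get_heading_hashtag_count_alt
  have hmain := pv_core block.toList
  have hb : ∀ kk : Nat, (PySem.Str.slice block (some (kk : Int)) (some ((kk : Int) + 1)) = " ")
      ↔ ((block.toList.drop kk).take 1 = [' ']) := by
    intro kk
    rw [← String.toList_inj, PySem.Str.toList_slice, PySem.Chars.slice_eq_listSlice]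
    rw [show ((kk : Int) + 1) = ((kk : Int) + ((1 : Nat) : Int)) by norm_num,
        PySem.List.slice_natCast_add]
    simp
  have hsw : (PySem.Str.startswith block "#" = true) ↔ ['#'] <+: block.toList := by
    rw [PySem.Str.startswith_eq, PySem.Chars.startswith_iff]
    simp
  have hlen : PySem.Str.len block = (block.toList.length : Int) := by
    simp [PySem.Str.len]
  simp only [hb, hsw, hlen, PySem.Str.pyGet?_natCast, Nat.cast_lt, gt_iff_lt, Nat.cast_lt]
  simp only [gt_iff_lt] at hmain
  exact hmain
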